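-- pv_equiv track=rewrite | github.com/nmak008/Music-Recommender | Practice Music Recommender.py | mostLiked
-- ===== SOURCE A (Python) =====
-- def mostLiked(userMap):
--     '''Returns the user who likes the most artists'''
--     users = {}
--     lens = []
--     highest = 0
--     for key in userMap:
--         if key[-1] != '$':
--             users[key] = userMap[key]
--     if users == {}:
--         return 'Sorry, no users found.'
--     for key in users:
--         r = users[key]
--         lens += [[key, len(r)]]
--     for item in lens:
--         if item[1] > highest:
--             highest = item[1]
--     for item in lens:
--         if item[1] == highest:
--             return(item[0])
-- ===== SOURCE B (Python) =====
-- def mostLiked(userMap):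
--     '''Returns the user who likes the most artists'''
--     best_key = None
--     best_len = -1
--     for key in userMap:
--         if key[-1] != '$':
--             n = len(userMap[key])
--             if n > best_len:
--                 best_len = n
--                 best_key = key
--     return 'Sorry, no users found.' if best_key is None else best_key
-- ===== Notes on version B (the rewrite author's own statement) =====
-- stated objective: simpler
-- what changed: A's four passes (filter non-'$' users into a dict, build a [key,len] list, scan for the maximum, rescan for the first key attaining it) are replaced by one strict-argmax pass with best_len initialised to -1, which returns the first user with the most artists directly.
import Mathlib
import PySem

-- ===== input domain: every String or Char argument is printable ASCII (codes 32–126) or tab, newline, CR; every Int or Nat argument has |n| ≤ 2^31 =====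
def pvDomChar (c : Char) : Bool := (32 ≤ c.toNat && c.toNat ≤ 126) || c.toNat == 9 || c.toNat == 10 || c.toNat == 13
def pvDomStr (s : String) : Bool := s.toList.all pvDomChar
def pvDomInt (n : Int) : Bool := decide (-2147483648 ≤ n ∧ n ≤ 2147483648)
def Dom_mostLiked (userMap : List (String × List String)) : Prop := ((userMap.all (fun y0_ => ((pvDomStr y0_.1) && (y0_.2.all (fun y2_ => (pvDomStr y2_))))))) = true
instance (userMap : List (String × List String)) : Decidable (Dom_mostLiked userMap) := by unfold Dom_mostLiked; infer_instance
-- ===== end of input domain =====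

-- B replaces A's four passes (filter into a dict, build a [key,len] list, take the max, rescan for
-- the first key attaining it) by one strict-argmax pass with best_len initialised to -1; objective: simpler.

-- ===== PORT A =====
-- key[-1] != '$'  (key[-1] raises IndexError on an empty key; Pre_ excludes empty keys)
def pvOk (key : String) : Bool := PySem.Str.pyGet? key (-1) != some '$'

-- userMap[key]; the key always comes from iterating userMap itself, so the default [] is never reached
def pvVal (userMap : List (String × List String)) (key : String) : List String :=
  (PySem.Dict.mk userMap).getD key []

def mostLiked (userMap : List (String × List String)) : String :=
  -- users = {}; for key in userMap: if key[-1] != '$': users[key] = userMap[key]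
  let users : PySem.Dict String (List String) :=
    userMap.foldl (fun u p => if pvOk p.1 then u.insert p.1 (pvVal userMap p.1) else u) PySem.Dict.empty
  -- if users == {}: return 'Sorry, no users found.'
  if users.items = [] then "Sorry, no users found."
  else
    -- lens = []; for key in users: r = users[key]; lens += [[key, len(r)]]
    let lens : List (String × Int) :=
      users.items.foldl (fun l p => l ++ [(p.1, (p.2.length : Int))]) []
    -- highest = 0; for item in lens: if item[1] > highest: highest = item[1]
    let highest : Int := lens.foldl (fun h it => if it.2 > h then it.2 else h) 0
    -- for item in lens: if item[1] == highest: return item[0]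
    -- (the loop always finds a match, so Python's fall-off-the-end None is unreachable)
    match lens.find? (fun it => it.2 == highest) with
    | some it => it.1
    | none => ""

-- ===== PORT B =====
def mostLiked_alt (userMap : List (String × List String)) : String :=
  -- best_key = None; best_len = -1; single pass with strict-greater update
  let r : Option String × Int :=
    userMap.foldl (fun acc p =>
      if pvOk p.1 then
        let n : Int := (pvVal userMap p.1).length
        if n > acc.2 then (some p.1, n) else acc
      else acc) (none, -1)
  match r.1 with
  | none => "Sorry, no users found."
  | some k => k

-- ===== PRECONDITION & SPEC =====
-- Pre_ excludes empty-string keys (key[-1] raises IndexError in A and in B) and duplicate keys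
-- (the Python argument is a dict, which cannot contain duplicate keys, so such lists correspond
-- to no real input).
def Pre_mostLiked (userMap : List (String × List String)) : Prop :=
  (userMap.map Prod.fst).Nodup ∧ ∀ p ∈ userMap, p.1 ≠ ""
instance (userMap : List (String × List String)) : Decidable (Pre_mostLiked userMap) := by
  unfold Pre_mostLiked; infer_instance
def pvWitness_mostLiked : (List (String × List String)) := [("alice", ["a", "b"]), ("bob$", ["c"])]

def Spec_mostLiked (userMap : List (String × List String)) (out : String) : Prop := out = mostLiked_alt userMap
instance (userMap : List (String × List String)) (out : String) : Decidable (Spec_mostLiked userMap out) := by unfold Spec_mostLiked; infer_instance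

-- ===== CLAIM (what is proved, stated in full; the proofs are below) =====
def Claim_equal_mostLiked : Prop := ∀ (userMap : List (String × List String)), Dom_mostLiked userMap → Pre_mostLiked userMap → Spec_mostLiked userMap (mostLiked userMap)

-- ===== LEMMAS AND PROOFS =====

-- conditional fold = plain fold over the filtered list
theorem foldl_if_filter {α β : Type} (ok : β → Bool) (f : α → β → α) :
    ∀ (L : List β) (a : α),
      L.foldl (fun u p => if ok p then f u p else u) a = (L.filter ok).foldl f a := by
  intro L
  induction L with
  | nil => intro a; rfl
  | cons p L ih =>
    intro a
    by_cases h : ok p = true <;> simp [h, ih]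

-- A's max loop
def pvBmax (m : Int) (L : List (String × Int)) : Int :=
  L.foldl (fun h it => if it.2 > h then it.2 else h) m

-- B's argmax loop, seeded with a current best
def pvG (a : String × Int) (L : List (String × Int)) : String × Int :=
  L.foldl (fun acc p => if p.2 > acc.2 then (p.1, p.2) else acc) a

theorem pvBmax_cons (m : Int) (q : String × Int) (L : List (String × Int)) :
    pvBmax m (q :: L) = pvBmax (if q.2 > m then q.2 else m) L := rfl

theorem pvG_cons (a : String × Int) (q : String × Int) (L : List (String × Int)) :
    pvG a (q :: L) = pvG (if q.2 > a.2 then (q.1, q.2) else a) L := rfl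

theorem le_pvBmax : ∀ (L : List (String × Int)) (m : Int), m ≤ pvBmax m L := by
  intro L
  induction L with
  | nil => intro m; simp [pvBmax]
  | cons p L ih =>
    intro m
    rw [pvBmax_cons]
    by_cases h : p.2 > m
    · rw [if_pos h]
      exact le_trans (le_of_lt h) (ih p.2)
    · rw [if_neg h]
      exact ih m

theorem pvBmax_eq_self : ∀ (L : List (String × Int)) (m : Int), pvBmax m L = m → ∀ p ∈ L, p.2 ≤ m := by
  intro L
  induction L with
  | nil => intro m _ p hp; cases hp
  | cons q L ih =>
    intro m hm p hp
    rw [pvBmax_cons] at hm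
    by_cases h : q.2 > m
    · rw [if_pos h] at hm
      have := le_pvBmax L q.2
      omega
    · rw [if_neg h] at hm
      rcases List.mem_cons.mp hp with rfl | hp'
      · omega
      · exact ih m hm p hp'

theorem pvG_const : ∀ (L : List (String × Int)) (k : String) (m : Int),
    (∀ p ∈ L, p.2 ≤ m) → pvG (k, m) L = (k, m) := by
  intro L
  induction L with
  | nil => intro k m _; rfl
  | cons q L ih =>
    intro k m h
    have hq : ¬ q.2 > (k, m).2 := by have := h q (by simp); simpa using by omega
    rw [pvG_cons, if_neg hq]
    exact ih k m (fun p hp => h p (by simp [hp]))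

-- the core: A's find?-of-the-max equals B's strict argmax, given a seeded first element
theorem pv_core : ∀ (L : List (String × Int)) (k : String) (m : Int),
    ((k, m) :: L).find? (fun it => it.2 == pvBmax m L) = some (pvG (k, m) L) := by
  intro L
  induction L with
  | nil => intro k m; simp [pvBmax, pvG, List.find?]
  | cons p L ih =>
    intro k m
    rw [pvBmax_cons, pvG_cons]
    by_cases h : p.2 > m
    · -- the new element strictly improves the best; the head fails the test
      rw [if_pos h, if_pos (show p.2 > (k, m).2 from h)]
      have hb : (m == pvBmax p.2 L) = false := by
        have := le_pvBmax L p.2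
        simp only [beq_eq_false_iff_ne, ne_eq]
        omega
      rw [List.find?_cons, hb]
      exact ih p.1 p.2
    · rw [if_neg h, if_neg (show ¬ p.2 > (k, m).2 from h)]
      by_cases he : pvBmax m L = m
      · -- nothing further exceeds m: find? stops at the head, pvG stays put
        rw [pvG_const L k m (pvBmax_eq_self L m he), List.find?_cons]
        simp [he]
      · -- the max lies further in L; the head and p both fail the test
        have hm := le_pvBmax L m
        have h1 : (m == pvBmax m L) = false := by
          simp only [beq_eq_false_iff_ne, ne_eq]; omega
        have h2 : (p.2 == pvBmax m L) = false := by
          simp only [beq_eq_false_iff_ne, ne_eq]; omega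
        have hfind := ih k m
        rw [List.find?_cons, h1] at hfind
        rw [List.find?_cons, h1, List.find?_cons, h2]
        exact hfind

-- B's fold keeps an Option best key: once seeded it is pvG
theorem pvFoldB_some (val : String → Int) :
    ∀ (L : List (String × List String)) (k : String) (m : Int),
    L.foldl (fun (acc : Option String × Int) p =>
        if val p.1 > acc.2 then (some p.1, val p.1) else acc) (some k, m)
      = (some (pvG (k, m) (L.map (fun p => (p.1, val p.1)))).1,
         (pvG (k, m) (L.map (fun p => (p.1, val p.1)))).2) := by
  intro L
  induction L with
  | nil => intro k m; rfl
  | cons p L ih =>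
    intro k m
    simp only [List.foldl_cons, List.map_cons, pvG_cons]
    by_cases h : val p.1 > m
    · simp only [if_pos (show val p.1 > ((some k : Option String), m).2 from h)]
      exact ih p.1 (val p.1)
    · simp only [if_neg (show ¬ val p.1 > ((some k : Option String), m).2 from h)]
      exact ih k m

-- filtered keys stay nodup, so A's insert loop always appends fresh keys
theorem pv_users_items (userMap : List (String × List String))
    (hnd : (userMap.map Prod.fst).Nodup) :
    (userMap.foldl (fun u p => if pvOk p.1 then u.insert p.1 (pvVal userMap p.1) else u)
        (PySem.Dict.empty : PySem.Dict String (List String))).items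
      = (userMap.filter (fun p => pvOk p.1)).map (fun p => (p.1, pvVal userMap p.1)) := by
  rw [foldl_if_filter]
  rw [PySem.Dict.items_foldl_insert_fresh]
  · rfl
  · intro a _; simp [PySem.Dict.contains_empty]
  · have : (List.filter (fun p => pvOk p.1) userMap).map Prod.fst
        = (userMap.map Prod.fst).filter (fun k => pvOk k) := by
      rw [List.filter_map]; rfl
    rw [this]
    exact hnd.filter _

-- ===== VERDICT (by name: the statement is the Claim_ definition above) =====
theorem mostLiked_spec : Claim_equal_mostLiked := by
  intro userMap _ hpre
  unfold Spec_mostLiked mostLiked mostLiked_alt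
  obtain ⟨hnd, -⟩ := hpre
  simp only []
  rw [pv_users_items userMap hnd, foldl_if_filter]
  cases hFc : userMap.filter (fun p => pvOk p.1) with
  | nil => simp
  | cons x rest =>
    rw [PySem.List.foldl_append_singleton_eq_map, List.map_map]
    simp only [List.map_cons, Function.comp_def, reduceCtorEq, List.nil_append, if_false,
      List.foldl_cons]
    rw [if_pos (show ((pvVal userMap x.1).length : Int) > -1 by omega)]
    rw [pvFoldB_some (fun k => ((pvVal userMap k).length : Int)) rest x.1
      ((pvVal userMap x.1).length : Int)]
    have hh : List.foldl (fun h it => if it.2 > h then it.2 else h)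
        (if ((pvVal userMap x.1).length : Int) > 0 then ((pvVal userMap x.1).length : Int) else 0)
        (rest.map (fun p => (p.1, ((pvVal userMap p.1).length : Int))))
        = pvBmax ((pvVal userMap x.1).length : Int)
            (rest.map (fun p => (p.1, ((pvVal userMap p.1).length : Int)))) := by
      by_cases h : ((pvVal userMap x.1).length : Int) > (0 : Int)
      · rw [if_pos h]; rfl
      · have h0 : ((pvVal userMap x.1).length : Int) = 0 := by omega
        rw [if_neg h, h0]; rfl
    rw [hh, pv_core (rest.map (fun p => (p.1, ((pvVal userMap p.1).length : Int)))) x.1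
      ((pvVal userMap x.1).length : Int)]
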